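-- pv_equiv track=rewrite | github.com/Jrgil20/rcp-contests-2024-07 | Forall.py | complejidad
-- ===== SOURCE A (Python) =====
-- def complejidad(num):
--     if num == 0:
--         return 0
--     elif num > 11111:
--         if num // 11111:
--             return 5 + complejidad(num // 11111) + complejidad(num % 11111)
--         else:
--             return 5 + complejidad(num % 11111)
--     elif num > 1111:
--         if num // 1111 != 1:
--             return 4 + complejidad(num // 1111) + complejidad(num % 1111)
--         else:
--             return 4 + complejidad(num % 1111)
--     elif num > 111:
--         if num //111 != 1:
--             return 3 + complejidad(num // 111) + complejidad(num % 111)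
--         else:
--             return 3 + complejidad(num % 111)
--     elif num > 11:
--         if num // 11 != 1:
--             return 2 + complejidad(num //11 ) + complejidad(num % 11)
--         else:
--             return 2 + complejidad(num % 11)
--     elif num == 3:
--         return 3
--     elif num % 3 == 0:
--         return complejidad(num // 3) +3
--     elif num == 2:
--         return 2
--     elif num % 2 == 0:
--         return  complejidad(num // 2) +2
--     elif num == 1:
--         return 1
--     else:
--         return 1 + complejidad(num - 1)
-- ===== SOURCE B (Python) =====
-- def complejidad(num):
--     # Iterative re-implementation: explicit stack + accumulator instead of recursion.
--     stack = [num]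
--     total = 0
--     while stack:
--         n = stack.pop()
--         if n == 0:
--             continue
--         elif n > 11111:
--             total += 5
--             if n // 11111:
--                 stack.append(n // 11111)
--             stack.append(n % 11111)
--         elif n > 1111:
--             total += 4
--             if n // 1111 != 1:
--                 stack.append(n // 1111)
--             stack.append(n % 1111)
--         elif n > 111:
--             total += 3
--             if n // 111 != 1:
--                 stack.append(n // 111)
--             stack.append(n % 111)
--         elif n > 11:
--             total += 2
--             if n // 11 != 1:
--                 stack.append(n // 11)
--             stack.append(n % 11)
--         elif n == 3:
--             total += 3
--         elif n % 3 == 0: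
--             total += 3
--             stack.append(n // 3)
--         elif n == 2:
--             total += 2
--         elif n % 2 == 0:
--             total += 2
--             stack.append(n // 2)
--         elif n == 1:
--             total += 1
--         else:
--             total += 1
--             stack.append(n - 1)
--     return total
-- ===== Notes on version B (the rewrite author's own statement) =====
-- stated objective: alternative
-- what changed: Replaced A's tree recursion by an iterative worklist: an explicit stack of pending numbers and a running accumulator, applying the same branch cascade per popped element.
import Mathlib
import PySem

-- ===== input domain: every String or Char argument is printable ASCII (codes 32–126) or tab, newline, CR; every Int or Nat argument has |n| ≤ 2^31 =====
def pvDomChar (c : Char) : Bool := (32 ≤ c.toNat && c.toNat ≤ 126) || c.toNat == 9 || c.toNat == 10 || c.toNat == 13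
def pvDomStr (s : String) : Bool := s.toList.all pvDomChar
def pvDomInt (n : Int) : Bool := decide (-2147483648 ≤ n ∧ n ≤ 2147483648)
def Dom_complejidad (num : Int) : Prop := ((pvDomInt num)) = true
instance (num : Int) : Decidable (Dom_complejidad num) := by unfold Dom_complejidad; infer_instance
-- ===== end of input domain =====

-- B replaces A's recursion by an explicit stack with an accumulator (same branch cascade, iterative); return-value equivalence proved for num ≥ 0 (A hits Python's recursion limit on negative num).

-- ===== PORT A =====
-- A's recursion, fueled: for num ≥ 0 every recursive argument is a strictly smaller
-- nonnegative integer, so fuel num.toNat + 1 is exact (proved in cgo_congr below);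
-- the fuel is only a totalization device, the branches are A's verbatim.
def cgo : Nat → Int → Int
  | 0, _ => 0
  | f+1, n =>
    if n = 0 then 0
    else if 11111 < n then
      if PySem.Int.floordiv n 11111 ≠ 0 then
        5 + cgo f (PySem.Int.floordiv n 11111) + cgo f (PySem.Int.mod n 11111)
      else 5 + cgo f (PySem.Int.mod n 11111)
    else if 1111 < n then
      if PySem.Int.floordiv n 1111 ≠ 1 then
        4 + cgo f (PySem.Int.floordiv n 1111) + cgo f (PySem.Int.mod n 1111)
      else 4 + cgo f (PySem.Int.mod n 1111)
    else if 111 < n then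
      if PySem.Int.floordiv n 111 ≠ 1 then
        3 + cgo f (PySem.Int.floordiv n 111) + cgo f (PySem.Int.mod n 111)
      else 3 + cgo f (PySem.Int.mod n 111)
    else if 11 < n then
      if PySem.Int.floordiv n 11 ≠ 1 then
        2 + cgo f (PySem.Int.floordiv n 11) + cgo f (PySem.Int.mod n 11)
      else 2 + cgo f (PySem.Int.mod n 11)
    else if n = 3 then 3
    else if PySem.Int.mod n 3 = 0 then cgo f (PySem.Int.floordiv n 3) + 3
    else if n = 2 then 2
    else if PySem.Int.mod n 2 = 0 then cgo f (PySem.Int.floordiv n 2) + 2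
    else if n = 1 then 1
    else 1 + cgo f (n - 1)

def complejidad (num : Int) : Int := cgo (num.toNat + 1) num

-- ===== PORT B =====
-- B's while-loop over an explicit stack, fueled by the total number of loop
-- iterations (≤ num + 1 for num ≥ 0, proved in bgo_spec below).
def bgo : Nat → List Int → Int → Int
  | 0, _, acc => acc
  | _+1, [], acc => acc
  | f+1, n :: st, acc =>
    if n = 0 then bgo f st acc
    else if 11111 < n then
      if PySem.Int.floordiv n 11111 ≠ 0 then
        bgo f (PySem.Int.mod n 11111 :: PySem.Int.floordiv n 11111 :: st) (acc + 5)
      else bgo f (PySem.Int.mod n 11111 :: st) (acc + 5)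
    else if 1111 < n then
      if PySem.Int.floordiv n 1111 ≠ 1 then
        bgo f (PySem.Int.mod n 1111 :: PySem.Int.floordiv n 1111 :: st) (acc + 4)
      else bgo f (PySem.Int.mod n 1111 :: st) (acc + 4)
    else if 111 < n then
      if PySem.Int.floordiv n 111 ≠ 1 then
        bgo f (PySem.Int.mod n 111 :: PySem.Int.floordiv n 111 :: st) (acc + 3)
      else bgo f (PySem.Int.mod n 111 :: st) (acc + 3)
    else if 11 < n then
      if PySem.Int.floordiv n 11 ≠ 1 then
        bgo f (PySem.Int.mod n 11 :: PySem.Int.floordiv n 11 :: st) (acc + 2)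
      else bgo f (PySem.Int.mod n 11 :: st) (acc + 2)
    else if n = 3 then bgo f st (acc + 3)
    else if PySem.Int.mod n 3 = 0 then bgo f (PySem.Int.floordiv n 3 :: st) (acc + 3)
    else if n = 2 then bgo f st (acc + 2)
    else if PySem.Int.mod n 2 = 0 then bgo f (PySem.Int.floordiv n 2 :: st) (acc + 2)
    else if n = 1 then bgo f st (acc + 1)
    else bgo f ((n - 1) :: st) (acc + 1)

def complejidad_alt (num : Int) : Int := bgo (num.toNat + 1) [num] 0

-- ===== PRECONDITION & SPEC =====
-- Pre_ excludes negative num, on which A recurses forever between num-1 and num//2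
-- and raises RecursionError (B's loop would not terminate there either).
def Pre_complejidad (num : Int) : Prop := 0 ≤ num
instance (num : Int) : Decidable (Pre_complejidad num) := by unfold Pre_complejidad; infer_instance
def pvWitness_complejidad : Int := (12345)

def Spec_complejidad (num : Int) (out : Int) : Prop := out = complejidad_alt num
instance (num : Int) (out : Int) : Decidable (Spec_complejidad num out) := by unfold Spec_complejidad; infer_instance

-- ===== CLAIM (what is proved, stated in full; the proofs are below) =====
def Claim_equal_complejidad : Prop := ∀ (num : Int), Dom_complejidad num → Pre_complejidad num → Spec_complejidad num (complejidad num)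

-- ===== LEMMAS AND PROOFS =====

theorem divFacts (n b : Int) (hb : 0 < b) :
    PySem.Int.floordiv n b * b + PySem.Int.mod n b = n ∧
    0 ≤ PySem.Int.mod n b ∧ PySem.Int.mod n b < b :=
  ⟨PySem.Int.floordiv_mul_add_mod n b, PySem.Int.mod_nonneg n hb, PySem.Int.mod_lt n hb⟩

-- A's recursion is fuel-insensitive above depth num: any two sufficient fuels agree.
theorem cgo_congr (k : Nat) : ∀ (n : Int) (f1 f2 : Nat), n.toNat = k → 0 ≤ n →
    n.toNat < f1 → n.toNat < f2 → cgo f1 n = cgo f2 n := by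
  induction k using Nat.strong_induction_on with
  | _ k IH =>
    intro n f1 f2 hk h0 h1 h2
    obtain ⟨g1, rfl⟩ : ∃ g, f1 = g + 1 := ⟨f1 - 1, by omega⟩
    obtain ⟨g2, rfl⟩ : ∃ g, f2 = g + 1 := ⟨f2 - 1, by omega⟩
    have step : ∀ m : Int, 0 ≤ m → m < n → cgo g1 m = cgo g2 m := by
      intro m hm hmn
      exact IH m.toNat (by omega) m g1 g2 rfl hm (by omega) (by omega)
    rw [cgo, cgo]
    by_cases hz : n = 0
    · simp only [if_pos hz]
    · simp only [if_neg hz]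
      by_cases hg11111 : 11111 < n
      · simp only [if_pos hg11111]
        by_cases hq11111 : PySem.Int.floordiv n 11111 ≠ 0
        · simp only [if_pos hq11111]
          obtain ⟨he, hr0, hrb⟩ := divFacts n 11111 (by norm_num)
          rw [step (PySem.Int.floordiv n 11111) (by omega) (by omega),
              step (PySem.Int.mod n 11111) (by omega) (by omega)]
        · simp only [if_neg hq11111]
          obtain ⟨he, hr0, hrb⟩ := divFacts n 11111 (by norm_num)
          rw [step (PySem.Int.mod n 11111) (by omega) (by omega)]
      · simp only [if_neg hg11111]
        by_cases hg1111 : 1111 < n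
        · simp only [if_pos hg1111]
          by_cases hq1111 : PySem.Int.floordiv n 1111 ≠ 1
          · simp only [if_pos hq1111]
            obtain ⟨he, hr0, hrb⟩ := divFacts n 1111 (by norm_num)
            rw [step (PySem.Int.floordiv n 1111) (by omega) (by omega),
                step (PySem.Int.mod n 1111) (by omega) (by omega)]
          · simp only [if_neg hq1111]
            obtain ⟨he, hr0, hrb⟩ := divFacts n 1111 (by norm_num)
            rw [step (PySem.Int.mod n 1111) (by omega) (by omega)]
        · simp only [if_neg hg1111]
          by_cases hg111 : 111 < n
          · simp only [if_pos hg111]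
            by_cases hq111 : PySem.Int.floordiv n 111 ≠ 1
            · simp only [if_pos hq111]
              obtain ⟨he, hr0, hrb⟩ := divFacts n 111 (by norm_num)
              rw [step (PySem.Int.floordiv n 111) (by omega) (by omega),
                  step (PySem.Int.mod n 111) (by omega) (by omega)]
            · simp only [if_neg hq111]
              obtain ⟨he, hr0, hrb⟩ := divFacts n 111 (by norm_num)
              rw [step (PySem.Int.mod n 111) (by omega) (by omega)]
          · simp only [if_neg hg111]
            by_cases hg11 : 11 < n
            · simp only [if_pos hg11]
              by_cases hq11 : PySem.Int.floordiv n 11 ≠ 1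
              · simp only [if_pos hq11]
                obtain ⟨he, hr0, hrb⟩ := divFacts n 11 (by norm_num)
                rw [step (PySem.Int.floordiv n 11) (by omega) (by omega),
                    step (PySem.Int.mod n 11) (by omega) (by omega)]
              · simp only [if_neg hq11]
                obtain ⟨he, hr0, hrb⟩ := divFacts n 11 (by norm_num)
                rw [step (PySem.Int.mod n 11) (by omega) (by omega)]
            · simp only [if_neg hg11]
              by_cases he3 : n = 3
              · simp only [if_pos he3]
              · simp only [if_neg he3]
                by_cases hm3 : PySem.Int.mod n 3 = 0
                · simp only [if_pos hm3]
                  obtain ⟨he, hr0, hrb⟩ := divFacts n 3 (by norm_num)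
                  rw [step (PySem.Int.floordiv n 3) (by omega) (by omega)]
                · simp only [if_neg hm3]
                  by_cases he2 : n = 2
                  · simp only [if_pos he2]
                  · simp only [if_neg he2]
                    by_cases hm2 : PySem.Int.mod n 2 = 0
                    · simp only [if_pos hm2]
                      obtain ⟨he, hr0, hrb⟩ := divFacts n 2 (by norm_num)
                      rw [step (PySem.Int.floordiv n 2) (by omega) (by omega)]
                    · simp only [if_neg hm2]
                      by_cases he1 : n = 1
                      · simp only [if_pos he1]
                      · simp only [if_neg he1]
                        rw [step (n - 1) (by omega) (by omega)]

-- iteration budget of B's loop and the value its stack still owes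
def weight : List Int → Nat
  | [] => 0
  | x :: st => x.toNat + 1 + weight st

def stackSum : List Int → Int
  | [] => 0
  | x :: st => complejidad x + stackSum st

-- B's loop invariant: with enough fuel, running the stack adds the owed complexity sum.
theorem bgo_spec (f : Nat) : ∀ (st : List Int) (acc : Int),
    (∀ x ∈ st, 0 ≤ x) → weight st ≤ f → bgo f st acc = acc + stackSum st := by
  induction f with
  | zero =>
    intro st acc hpos hw
    cases st with
    | nil => simp [bgo, stackSum]
    | cons n st => exfalso; simp only [weight] at hw; omega
  | succ f IH =>
    intro st acc hpos hw
    cases st with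
    | nil => simp [bgo, stackSum]
    | cons n st =>
      have h0 : 0 ≤ n := hpos n List.mem_cons_self
      have hst : ∀ x ∈ st, 0 ≤ x := fun x hx => hpos x (List.mem_cons_of_mem _ hx)
      simp only [weight] at hw
      have cC : ∀ m : Int, 0 ≤ m → m < n → cgo n.toNat m = complejidad m := by
        intro m hm hmn
        rw [complejidad]
        exact cgo_congr m.toNat m n.toNat (m.toNat + 1) rfl hm (by omega) (by omega)
      rw [bgo]
      by_cases hz : n = 0
      · simp only [if_pos hz]
        rw [IH st acc hst (by omega)]
        have hcn : complejidad n = 0 := by rw [hz]; decide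
        simp only [stackSum]
        omega
      · simp only [if_neg hz]
        by_cases hg11111 : 11111 < n
        · simp only [if_pos hg11111]
          obtain ⟨he, hr0, hrb⟩ := divFacts n 11111 (by norm_num)
          by_cases hq11111 : PySem.Int.floordiv n 11111 ≠ 0
          · simp only [if_pos hq11111]
            have hcn : complejidad n = 5 + complejidad (PySem.Int.floordiv n 11111) + complejidad (PySem.Int.mod n 11111) := by
              rw [complejidad, cgo]
              simp only [if_neg hz, if_pos hg11111, if_pos hq11111]
              rw [cC (PySem.Int.floordiv n 11111) (by omega) (by omega),
                  cC (PySem.Int.mod n 11111) (by omega) (by omega)]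
            rw [IH _ _ (by intro x hx; simp only [List.mem_cons] at hx; rcases hx with rfl | rfl | hx <;> first | omega | exact hst x hx)
                   (by simp only [weight]; omega)]
            simp only [stackSum]
            omega
          · simp only [if_neg hq11111]
            have hcn : complejidad n = 5 + complejidad (PySem.Int.mod n 11111) := by
              rw [complejidad, cgo]
              simp only [if_neg hz, if_pos hg11111, if_neg hq11111]
              rw [cC (PySem.Int.mod n 11111) (by omega) (by omega)]
            rw [IH _ _ (by intro x hx; simp only [List.mem_cons] at hx; rcases hx with rfl | hx <;> first | omega | exact hst x hx)
                   (by simp only [weight]; omega)]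
            simp only [stackSum]
            omega
        · simp only [if_neg hg11111]
          by_cases hg1111 : 1111 < n
          · simp only [if_pos hg1111]
            obtain ⟨he, hr0, hrb⟩ := divFacts n 1111 (by norm_num)
            by_cases hq1111 : PySem.Int.floordiv n 1111 ≠ 1
            · simp only [if_pos hq1111]
              have hcn : complejidad n = 4 + complejidad (PySem.Int.floordiv n 1111) + complejidad (PySem.Int.mod n 1111) := by
                rw [complejidad, cgo]
                simp only [if_neg hz, if_neg hg11111, if_pos hg1111, if_pos hq1111]
                rw [cC (PySem.Int.floordiv n 1111) (by omega) (by omega),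
                    cC (PySem.Int.mod n 1111) (by omega) (by omega)]
              rw [IH _ _ (by intro x hx; simp only [List.mem_cons] at hx; rcases hx with rfl | rfl | hx <;> first | omega | exact hst x hx)
                     (by simp only [weight]; omega)]
              simp only [stackSum]
              omega
            · simp only [if_neg hq1111]
              have hcn : complejidad n = 4 + complejidad (PySem.Int.mod n 1111) := by
                rw [complejidad, cgo]
                simp only [if_neg hz, if_neg hg11111, if_pos hg1111, if_neg hq1111]
                rw [cC (PySem.Int.mod n 1111) (by omega) (by omega)]
              rw [IH _ _ (by intro x hx; simp only [List.mem_cons] at hx; rcases hx with rfl | hx <;> first | omega | exact hst x hx)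
                     (by simp only [weight]; omega)]
              simp only [stackSum]
              omega
          · simp only [if_neg hg1111]
            by_cases hg111 : 111 < n
            · simp only [if_pos hg111]
              obtain ⟨he, hr0, hrb⟩ := divFacts n 111 (by norm_num)
              by_cases hq111 : PySem.Int.floordiv n 111 ≠ 1
              · simp only [if_pos hq111]
                have hcn : complejidad n = 3 + complejidad (PySem.Int.floordiv n 111) + complejidad (PySem.Int.mod n 111) := by
                  rw [complejidad, cgo]
                  simp only [if_neg hz, if_neg hg11111, if_neg hg1111, if_pos hg111, if_pos hq111]
                  rw [cC (PySem.Int.floordiv n 111) (by omega) (by omega),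
                      cC (PySem.Int.mod n 111) (by omega) (by omega)]
                rw [IH _ _ (by intro x hx; simp only [List.mem_cons] at hx; rcases hx with rfl | rfl | hx <;> first | omega | exact hst x hx)
                       (by simp only [weight]; omega)]
                simp only [stackSum]
                omega
              · simp only [if_neg hq111]
                have hcn : complejidad n = 3 + complejidad (PySem.Int.mod n 111) := by
                  rw [complejidad, cgo]
                  simp only [if_neg hz, if_neg hg11111, if_neg hg1111, if_pos hg111, if_neg hq111]
                  rw [cC (PySem.Int.mod n 111) (by omega) (by omega)]
                rw [IH _ _ (by intro x hx; simp only [List.mem_cons] at hx; rcases hx with rfl | hx <;> first | omega | exact hst x hx)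
                       (by simp only [weight]; omega)]
                simp only [stackSum]
                omega
            · simp only [if_neg hg111]
              by_cases hg11 : 11 < n
              · simp only [if_pos hg11]
                obtain ⟨he, hr0, hrb⟩ := divFacts n 11 (by norm_num)
                by_cases hq11 : PySem.Int.floordiv n 11 ≠ 1
                · simp only [if_pos hq11]
                  have hcn : complejidad n = 2 + complejidad (PySem.Int.floordiv n 11) + complejidad (PySem.Int.mod n 11) := by
                    rw [complejidad, cgo]
                    simp only [if_neg hz, if_neg hg11111, if_neg hg1111, if_neg hg111, if_pos hg11, if_pos hq11]
                    rw [cC (PySem.Int.floordiv n 11) (by omega) (by omega),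
                        cC (PySem.Int.mod n 11) (by omega) (by omega)]
                  rw [IH _ _ (by intro x hx; simp only [List.mem_cons] at hx; rcases hx with rfl | rfl | hx <;> first | omega | exact hst x hx)
                         (by simp only [weight]; omega)]
                  simp only [stackSum]
                  omega
                · simp only [if_neg hq11]
                  have hcn : complejidad n = 2 + complejidad (PySem.Int.mod n 11) := by
                    rw [complejidad, cgo]
                    simp only [if_neg hz, if_neg hg11111, if_neg hg1111, if_neg hg111, if_pos hg11, if_neg hq11]
                    rw [cC (PySem.Int.mod n 11) (by omega) (by omega)]
                  rw [IH _ _ (by intro x hx; simp only [List.mem_cons] at hx; rcases hx with rfl | hx <;> first | omega | exact hst x hx)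
                         (by simp only [weight]; omega)]
                  simp only [stackSum]
                  omega
              · simp only [if_neg hg11]
                by_cases he3 : n = 3
                · simp only [if_pos he3]
                  rw [IH st _ hst (by omega)]
                  have hcn : complejidad n = 3 := by rw [he3]; decide
                  simp only [stackSum]
                  omega
                · simp only [if_neg he3]
                  by_cases hm3 : PySem.Int.mod n 3 = 0
                  · simp only [if_pos hm3]
                    obtain ⟨he, hr0, hrb⟩ := divFacts n 3 (by norm_num)
                    have hcn : complejidad n = complejidad (PySem.Int.floordiv n 3) + 3 := by
                      rw [complejidad, cgo]
                      simp only [if_neg hz, if_neg hg11111, if_neg hg1111, if_neg hg111, if_neg hg11, if_neg he3, if_pos hm3]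
                      rw [cC (PySem.Int.floordiv n 3) (by omega) (by omega)]
                    rw [IH _ _ (by intro x hx; simp only [List.mem_cons] at hx; rcases hx with rfl | hx <;> first | omega | exact hst x hx)
                           (by simp only [weight]; omega)]
                    simp only [stackSum]
                    omega
                  · simp only [if_neg hm3]
                    by_cases he2 : n = 2
                    · simp only [if_pos he2]
                      rw [IH st _ hst (by omega)]
                      have hcn : complejidad n = 2 := by rw [he2]; decide
                      simp only [stackSum]
                      omega
                    · simp only [if_neg he2]
                      by_cases hm2 : PySem.Int.mod n 2 = 0
                      · simp only [if_pos hm2]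
                        obtain ⟨he, hr0, hrb⟩ := divFacts n 2 (by norm_num)
                        have hcn : complejidad n = complejidad (PySem.Int.floordiv n 2) + 2 := by
                          rw [complejidad, cgo]
                          simp only [if_neg hz, if_neg hg11111, if_neg hg1111, if_neg hg111, if_neg hg11, if_neg he3, if_neg hm3, if_neg he2, if_pos hm2]
                          rw [cC (PySem.Int.floordiv n 2) (by omega) (by omega)]
                        rw [IH _ _ (by intro x hx; simp only [List.mem_cons] at hx; rcases hx with rfl | hx <;> first | omega | exact hst x hx)
                               (by simp only [weight]; omega)]
                        simp only [stackSum]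
                        omega
                      · simp only [if_neg hm2]
                        by_cases he1 : n = 1
                        · simp only [if_pos he1]
                          rw [IH st _ hst (by omega)]
                          have hcn : complejidad n = 1 := by rw [he1]; decide
                          simp only [stackSum]
                          omega
                        · simp only [if_neg he1]
                          have hcn : complejidad n = 1 + complejidad (n - 1) := by
                            rw [complejidad, cgo]
                            simp only [if_neg hz, if_neg hg11111, if_neg hg1111, if_neg hg111, if_neg hg11, if_neg he3, if_neg hm3, if_neg he2, if_neg hm2, if_neg he1]
                            rw [cC (n - 1) (by omega) (by omega)]
                          rw [IH _ _ (by intro x hx; simp only [List.mem_cons] at hx; rcases hx with rfl | hx <;> first | omega | exact hst x hx)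
                                 (by simp only [weight]; omega)]
                          simp only [stackSum]
                          omega

-- ===== VERDICT (by name: the statement is the Claim_ definition above) =====
theorem complejidad_spec : Claim_equal_complejidad := by
  intro num _ hpre
  have h0 : (0:Int) ≤ num := hpre
  show complejidad num = complejidad_alt num
  rw [complejidad_alt, bgo_spec (num.toNat + 1) [num] 0
        (by intro x hx; simp only [List.mem_singleton] at hx; omega)
        (by simp only [weight]; omega)]
  simp [stackSum]
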